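-- pv_equiv track=rewrite | github.com/senacormf/email2kafka-tester-cli | src/simple_e2e_tester/email_sending/email_dispatch.py | _collect_pdf_offsets
-- ===== SOURCE A (Python) =====
-- from collections.abc import Sequence
--
-- def _collect_pdf_offsets(
--     objects: Sequence[str], pdf_header: str
-- ) -> tuple[list[str], list[int], int]:
--     body_chunks: list[str] = []
--     offsets: list[int] = []
--     current_offset = len(pdf_header.encode("latin-1"))
--     for obj in objects:
--         offsets.append(current_offset)
--         body_chunks.append(obj)
--         current_offset += len(obj.encode("latin-1"))
--     return body_chunks, offsets, current_offset
-- ===== SOURCE B (Python) =====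
-- from collections.abc import Sequence
--
--
-- def _collect_pdf_offsets(
--     objects: Sequence[str], pdf_header: str
-- ) -> tuple[list[str], list[int], int]:
--     chunks = list(objects)
--     total = len(pdf_header.encode("latin-1")) + sum(
--         len(o.encode("latin-1")) for o in chunks
--     )
--     offsets: list[int] = []
--     running = total
--     for o in reversed(chunks):
--         running -= len(o.encode("latin-1"))
--         offsets.append(running)
--     offsets.reverse()
--     return chunks, offsets, total
-- ===== Notes on version B (the rewrite author's own statement) =====
-- stated objective: alternative
-- what changed: Instead of a forward running-sum, B computes the grand total first and then derives each offset back-to-front by subtracting lengths while walking the objects in reverse, reversing the offsets list at the end.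
import Mathlib
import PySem

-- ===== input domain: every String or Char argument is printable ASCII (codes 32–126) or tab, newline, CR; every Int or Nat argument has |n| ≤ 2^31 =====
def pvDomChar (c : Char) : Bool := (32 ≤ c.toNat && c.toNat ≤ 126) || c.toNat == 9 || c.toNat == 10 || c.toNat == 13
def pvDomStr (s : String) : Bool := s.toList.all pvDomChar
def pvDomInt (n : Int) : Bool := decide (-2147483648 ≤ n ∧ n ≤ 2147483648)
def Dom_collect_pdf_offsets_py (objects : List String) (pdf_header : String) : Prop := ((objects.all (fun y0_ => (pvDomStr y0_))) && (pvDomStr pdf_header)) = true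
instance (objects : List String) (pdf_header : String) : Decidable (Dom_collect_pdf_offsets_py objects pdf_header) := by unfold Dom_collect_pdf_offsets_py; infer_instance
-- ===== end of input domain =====

-- B computes the grand total first, then derives offsets back-to-front by subtraction (objective: alternative).
-- On the ASCII domain, len(s.encode("latin-1")) = len(s) = PySem.Str.len s.

-- ===== PORT A =====
-- A's for-loop over objects with state (body_chunks, offsets, current_offset)
def pvALoop : List String → List String → List Int → Int → List String × List Int × Int
  | [], body, offs, cur => (body, offs, cur)
  | obj :: rest, body, offs, cur =>
      pvALoop rest (body ++ [obj]) (offs ++ [cur]) (cur + PySem.Str.len obj)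

def collect_pdf_offsets_py (objects : List String) (pdf_header : String) : List String × List Int × Int :=
  pvALoop objects [] [] (PySem.Str.len pdf_header)

-- ===== PORT B =====
def collect_pdf_offsets_py_alt (objects : List String) (pdf_header : String) : List String × List Int × Int :=
  let total : Int := PySem.Str.len pdf_header + (objects.map (fun o => PySem.Str.len o)).sum
  -- for o in reversed(chunks): running -= len(o); offsets.append(running)
  let st : List Int × Int := objects.reverse.foldl
      (fun (p : List Int × Int) o => (p.1 ++ [p.2 - PySem.Str.len o], p.2 - PySem.Str.len o))
      ([], total)
  (objects, st.1.reverse, total)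

-- ===== PRECONDITION & SPEC =====
def Spec_collect_pdf_offsets_py (objects : List String) (pdf_header : String) (out : List String × List Int × Int) : Prop := out = collect_pdf_offsets_py_alt objects pdf_header
instance (objects : List String) (pdf_header : String) (out : List String × List Int × Int) : Decidable (Spec_collect_pdf_offsets_py objects pdf_header out) := by unfold Spec_collect_pdf_offsets_py; infer_instance

-- ===== CLAIM (what is proved, stated in full; the proofs are below) =====
def Claim_equal_collect_pdf_offsets_py : Prop := ∀ (objects : List String) (pdf_header : String), Dom_collect_pdf_offsets_py objects pdf_header → Spec_collect_pdf_offsets_py objects pdf_header (collect_pdf_offsets_py objects pdf_header)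

-- ===== LEMMAS AND PROOFS =====

-- forward prefix offsets: pvPre c lens = [c, c+l1, c+l1+l2, …] (n entries)
def pvPre : Int → List Int → List Int
  | _, [] => []
  | c, l :: ls => c :: pvPre (c + l) ls

-- backward offsets as B's loop produces them (in processing order)
def pvF : Int → List Int → List Int
  | _, [] => []
  | t, l :: ls => (t - l) :: pvF (t - l) ls

theorem pvALoop_eq (xs : List String) : ∀ (b : List String) (o : List Int) (c : Int),
    pvALoop xs b o c =
      (b ++ xs, o ++ pvPre c (xs.map (fun s => PySem.Str.len s)),
       c + (xs.map (fun s => PySem.Str.len s)).sum) := by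
  induction xs with
  | nil => intro b o c; simp [pvALoop, pvPre]
  | cons x rest ih =>
      intro b o c
      rw [pvALoop, ih]
      simp [pvPre]
      ring

theorem pvBFold_eq (ys : List String) : ∀ (acc : List Int) (t : Int),
    ys.foldl (fun (p : List Int × Int) o => (p.1 ++ [p.2 - PySem.Str.len o], p.2 - PySem.Str.len o)) (acc, t)
      = (acc ++ pvF t (ys.map (fun s => PySem.Str.len s)),
         t - (ys.map (fun s => PySem.Str.len s)).sum) := by
  induction ys with
  | nil => intro acc t; simp [pvF]
  | cons y rest ih =>
      intro acc t
      rw [List.foldl_cons, ih]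
      simp [pvF]
      ring

theorem pvPre_append (x : Int) (ls : List Int) : ∀ (c : Int),
    pvPre c (ls ++ [x]) = pvPre c ls ++ [c + ls.sum] := by
  induction ls with
  | nil => intro c; simp [pvPre]
  | cons l ls ih =>
      intro c
      simp only [List.cons_append, pvPre, ih, List.sum_cons]
      simp
      ring

theorem pvF_rev (ls : List Int) : ∀ (t : Int),
    (pvF t ls).reverse = pvPre (t - ls.sum) ls.reverse := by
  induction ls with
  | nil => intro t; simp [pvF, pvPre]
  | cons l ls ih =>
      intro t
      simp only [pvF, List.reverse_cons, ih, List.sum_cons, pvPre_append, List.sum_reverse]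
      congr 2
      · ring_nf
      · ring

-- ===== VERDICT (by name: the statement is the Claim_ definition above) =====
theorem collect_pdf_offsets_py_spec : Claim_equal_collect_pdf_offsets_py := by
  intro objects pdf_header _
  unfold Spec_collect_pdf_offsets_py collect_pdf_offsets_py collect_pdf_offsets_py_alt
  rw [pvALoop_eq]
  simp only [List.nil_append, pvBFold_eq]
  have : (objects.reverse.map (fun s => PySem.Str.len s)) = (objects.map (fun s => PySem.Str.len s)).reverse := by
    simp
  rw [this, pvF_rev, List.reverse_reverse, List.sum_reverse]
  simp
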